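-- pv_equiv track=rewrite | github.com/ITHwang/coding-test-python | programmers/2022-군장병sw교육/python/Lv3_숫자 게임.py | solution
-- ===== SOURCE A (Python) =====
-- def solution(a, b):
--     score = 0
--     a, b = sorted(a), sorted(b)
--     while b:
--         if b[0] <= a[0]:
--             a.pop()
--             b.pop(0)
--         else:
--             score += 1
--             a.pop(0)
--             b.pop(0)
--     return score
-- ===== SOURCE B (Python) =====
-- def solution(a, b):
--     sa = sorted(a)
--     sb = sorted(b)
--     i = 0
--     score = 0
--     for x in sb:
--         if x > sa[i]:
--             score += 1
--             i += 1
--     return score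
-- ===== Notes on version B (the rewrite author's own statement) =====
-- stated objective: faster
-- what changed: Replaced the destructive while-loop that repeatedly does list.pop(0)/pop() (each O(n)) with a single two-pointer pass over the sorted arrays keeping an index, so no list mutation at all.
import Mathlib
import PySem

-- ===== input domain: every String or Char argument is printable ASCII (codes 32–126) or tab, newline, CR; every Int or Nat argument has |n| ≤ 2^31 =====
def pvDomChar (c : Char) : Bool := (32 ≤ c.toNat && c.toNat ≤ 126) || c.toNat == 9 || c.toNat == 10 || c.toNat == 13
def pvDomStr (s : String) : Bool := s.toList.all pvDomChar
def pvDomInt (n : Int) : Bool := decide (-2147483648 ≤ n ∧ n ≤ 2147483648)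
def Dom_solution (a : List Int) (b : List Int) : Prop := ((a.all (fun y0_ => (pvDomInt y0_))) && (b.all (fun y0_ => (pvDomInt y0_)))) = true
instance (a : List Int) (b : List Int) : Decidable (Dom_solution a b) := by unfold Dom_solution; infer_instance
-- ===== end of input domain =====

-- B replaces A's destructive while-loop with pop(0)/pop() by a single two-pointer pass
-- over the sorted arrays (an index instead of mutation); return values proved equal on Pre_.

-- ===== PORT A =====
-- the while loop: state is (a, score); each step consumes b's head.
-- a[0] is in range on every input admitted by Pre_solution; headD 0 stands in for it.
def solutionGo (a : List Int) (b : List Int) (score : Int) : Int :=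
  match b with
  | [] => score
  | bh :: bt =>
      if bh ≤ a.headD 0 then
        solutionGo a.dropLast bt score          -- a.pop(); b.pop(0)
      else
        solutionGo a.tail bt (score + 1)        -- score += 1; a.pop(0); b.pop(0)

def solution (a : List Int) (b : List Int) : Int :=
  solutionGo (PySem.List.sorted a (fun x => x) false) (PySem.List.sorted b (fun x => x) false) 0

-- ===== PORT B =====
-- fold over sb with state (i, score); sa[i] is in range under Pre_solution (getD 0 stands in).
def solution_alt (a : List Int) (b : List Int) : Int :=
  let sa := PySem.List.sorted a (fun x => x) false
  let sb := PySem.List.sorted b (fun x => x) false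
  (sb.foldl (fun (st : Nat × Int) x =>
      if x > sa.getD st.1 0 then (st.1 + 1, st.2 + 1) else st) (0, 0)).2

-- ===== PRECONDITION & SPEC =====
-- A raises IndexError (a[0] on an emptied a) exactly when len(b) > len(a); Pre_ excludes that.
def Pre_solution (a : List Int) (b : List Int) : Prop := b.length ≤ a.length
instance (a : List Int) (b : List Int) : Decidable (Pre_solution a b) := by
  unfold Pre_solution; infer_instance
def pvWitness_solution : List Int × List Int := ([3, 1, 2], [2, 3])

def Spec_solution (a : List Int) (b : List Int) (out : Int) : Prop := out = solution_alt a b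
instance (a : List Int) (b : List Int) (out : Int) : Decidable (Spec_solution a b out) := by
  unfold Spec_solution; infer_instance

-- ===== CLAIM (what is proved, stated in full; the proofs are below) =====
def Claim_equal_solution : Prop := ∀ (a : List Int) (b : List Int), Dom_solution a b → Pre_solution a b → Spec_solution a b (solution a b)

-- ===== LEMMAS AND PROOFS =====

-- common two-pointer recursion both ports reduce to
def cnt : List Int → List Int → Int
  | _, [] => 0
  | a, x :: bt => if x ≤ a.headD 0 then cnt a bt else 1 + cnt a.tail bt

theorem cnt_dropLast (b : List Int) : ∀ (a : List Int), b.length + 1 ≤ a.length →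
    cnt a.dropLast b = cnt a b := by
  induction b with
  | nil => intro a _; simp [cnt]
  | cons x bt ih =>
      intro a h
      have h2 : 2 ≤ a.length := by simp at h; omega
      have hhead : a.dropLast.headD 0 = a.headD 0 := by
        match a, h2 with
        | a0 :: a1 :: rest, _ => simp [List.dropLast]
      have htail : a.dropLast.tail = a.tail.dropLast := by
        match a, h2 with
        | a0 :: a1 :: rest, _ => simp
      simp only [cnt, hhead]
      split
      · exact ih a (by simp at h ⊢; omega)
      · rw [htail, ih a.tail (by simp at h ⊢; omega)]

theorem solutionGo_eq_cnt (b : List Int) : ∀ (a : List Int) (s : Int),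
    b.length ≤ a.length → solutionGo a b s = s + cnt a b := by
  induction b with
  | nil => intro a s _; simp [solutionGo, cnt]
  | cons x bt ih =>
      intro a s h
      simp only [solutionGo, cnt]
      split
      · rw [ih a.dropLast s (by simp at h ⊢; omega),
            cnt_dropLast bt a (by simp at h ⊢; omega)]
      · rw [ih a.tail (s + 1) (by simp at h ⊢; omega)]
        ring

theorem getD_eq_headD_drop (l : List Int) : ∀ (i : Nat), l.getD i 0 = (l.drop i).headD 0 := by
  induction l with
  | nil => intro i; simp
  | cons x t ih =>
      intro i
      cases i with
      | zero => simp
      | succ j => simp [ih j]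

theorem foldl_eq_cnt (sa : List Int) (b : List Int) : ∀ (i : Nat) (s : Int),
    (b.foldl (fun (st : Nat × Int) x =>
      if x > sa.getD st.1 0 then (st.1 + 1, st.2 + 1) else st) (i, s)).2
      = s + cnt (sa.drop i) b := by
  induction b with
  | nil => intro i s; simp [cnt]
  | cons x bt ih =>
      intro i s
      have hh := getD_eq_headD_drop sa i
      simp only [List.foldl_cons, cnt]
      by_cases hx : x ≤ sa.getD i 0
      · rw [if_neg (not_lt.2 hx), if_pos (by rw [← hh]; exact hx)]
        exact ih i s
      · rw [if_pos (not_le.1 hx), if_neg (by rw [← hh]; exact hx)]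
        rw [ih (i + 1) (s + 1), List.tail_drop]
        ring

-- ===== VERDICT (by name: the statement is the Claim_ definition above) =====
theorem solution_spec : Claim_equal_solution := by
  intro a b _ hpre
  unfold Spec_solution solution solution_alt
  have hlen : (PySem.List.sorted b (fun x => x) false).length
      ≤ (PySem.List.sorted a (fun x => x) false).length := by
    simpa [PySem.List.length_sorted] using hpre
  rw [solutionGo_eq_cnt _ _ _ hlen]
  simpa using (foldl_eq_cnt (PySem.List.sorted a (fun x => x) false)
    (PySem.List.sorted b (fun x => x) false) 0 0).symm
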